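-- pv_equiv track=rewrite | github.com/vasivandrij656-arch/atlastrinity | src/brain/behavior/constraint_monitor.py | _extract_violation
-- ===== SOURCE A (Python) =====
-- def _extract_violation(text: str) -> str:
--     """Parses the LLM response to extract the specific violation."""
--     for line in text.split("\n"):
--         if "VIOLATION:" in line:
--             return line.split("VIOLATION:")[1].strip()
--
--     # Fallback: extract anything suspicious
--     for line in text.split("\n"):
--         if any(k in line.lower() for k in ["violation", "constraint", "error"]):
--             return line.strip()[:100]
--
--     return "Unknown Violation"
-- ===== SOURCE B (Python) =====
-- def _extract_violation(text: str) -> str: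
--     """Single pass: return on explicit marker, buffer first suspicious line."""
--     fallback = None
--     for line in text.split("\n"):
--         if "VIOLATION:" in line:
--             return line.split("VIOLATION:")[1].strip()
--         if fallback is None and any(k in line.lower() for k in ["violation", "constraint", "error"]):
--             fallback = line.strip()[:100]
--     return fallback if fallback is not None else "Unknown Violation"
-- ===== Notes on version B (the rewrite author's own statement) =====
-- stated objective: alternative
-- what changed: A scans the lines twice (one full pass for the explicit VIOLATION: marker, then a second pass for a suspicious fallback line); B makes a single pass that returns on the marker and buffers the first fallback candidate, deciding after the loop.
import Mathlib
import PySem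

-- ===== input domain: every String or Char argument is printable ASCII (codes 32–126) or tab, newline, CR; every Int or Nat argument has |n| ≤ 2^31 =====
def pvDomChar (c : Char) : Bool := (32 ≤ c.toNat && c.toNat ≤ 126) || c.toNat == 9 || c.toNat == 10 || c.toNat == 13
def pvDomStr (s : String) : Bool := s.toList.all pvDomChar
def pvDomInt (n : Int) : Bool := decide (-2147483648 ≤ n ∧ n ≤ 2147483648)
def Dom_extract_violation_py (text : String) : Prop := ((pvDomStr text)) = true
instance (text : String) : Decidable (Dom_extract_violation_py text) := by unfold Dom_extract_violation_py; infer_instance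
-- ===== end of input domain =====

-- ===== PORT A =====
-- B makes a single pass where A makes two; same return value, no side effects.
-- helpers of A: the two loops of _extract_violation, line by line
def pvKeywords : List String := ["violation", "constraint", "error"]

-- line.split("VIOLATION:")[1].strip() — split? is some (sep is the non-empty literal),
-- and the guard "VIOLATION:" in line guarantees index 1 exists, so pyGetD is exact here
def pvMarkerResult (line : String) : String :=
  PySem.Str.strip (PySem.List.pyGetD ((PySem.Str.split? line "VIOLATION:").getD []) 1 "")

-- first loop: return on a line containing the explicit marker
def pvFindMarker : List String → Option String
  | [] => none
  | l :: ls =>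
    if PySem.Str.isIn "VIOLATION:" l then some (pvMarkerResult l) else pvFindMarker ls

-- second loop: return the first suspicious line, stripped and truncated to 100 chars
def pvFindFallback : List String → Option String
  | [] => none
  | l :: ls =>
    if pvKeywords.any (fun k => PySem.Str.isIn k (PySem.Str.lower l)) then
      some (PySem.Str.slice (PySem.Str.strip l) none (some 100))
    else pvFindFallback ls

def extract_violation_py (text : String) : String :=
  let lines := (PySem.Str.split? text "\n").getD []
  match pvFindMarker lines with
  | some r => r
  | none =>
    match pvFindFallback lines with
    | some r => r
    | none => "Unknown Violation"

-- ===== PORT B =====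
-- single pass with a fallback buffer (Source B)
def pvScan : List String → Option String → String
  | [], buf => buf.getD "Unknown Violation"
  | l :: ls, buf =>
    if PySem.Str.isIn "VIOLATION:" l then pvMarkerResult l
    else if buf.isNone && pvKeywords.any (fun k => PySem.Str.isIn k (PySem.Str.lower l)) then
      pvScan ls (some (PySem.Str.slice (PySem.Str.strip l) none (some 100)))
    else pvScan ls buf

def extract_violation_py_alt (text : String) : String :=
  pvScan ((PySem.Str.split? text "\n").getD []) none

-- ===== PRECONDITION & SPEC =====
def Spec_extract_violation_py (text : String) (out : String) : Prop := out = extract_violation_py_alt text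
instance (text : String) (out : String) : Decidable (Spec_extract_violation_py text out) := by unfold Spec_extract_violation_py; infer_instance

-- ===== CLAIM (what is proved, stated in full; the proofs are below) =====
def Claim_equal_extract_violation_py : Prop := ∀ (text : String), Dom_extract_violation_py text → Spec_extract_violation_py text (extract_violation_py text)

-- ===== LEMMAS AND PROOFS =====
-- loop invariant of B: with buffer `buf`, the scan returns the marker result of the first
-- marker line if any, else the buffer if set, else A's fallback result on the same lines
theorem pvScan_eq (ls : List String) (buf : Option String) :
    pvScan ls buf =
      match pvFindMarker ls with
      | some r => r
      | none =>
        match buf with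
        | some b => b
        | none =>
          match pvFindFallback ls with
          | some r => r
          | none => "Unknown Violation" := by
  induction ls generalizing buf with
  | nil => cases buf <;> simp only [pvScan, pvFindMarker, pvFindFallback, Option.getD]
  | cons l ls ih =>
    by_cases hm : PySem.Str.isIn "VIOLATION:" l = true
    · simp only [pvScan, pvFindMarker, hm, if_true]
    · by_cases hf : (pvKeywords.any fun k => PySem.Str.isIn k (PySem.Str.lower l)) = true
      · cases buf with
        | some b =>
          simp only [pvScan, pvFindMarker, hm, Bool.false_eq_true, if_false,
            Option.isNone_some, Bool.false_and, ih]
        | none =>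
          simp only [pvScan, pvFindMarker, pvFindFallback, hm, hf, Bool.false_eq_true,
            if_false, if_true, Option.isNone_none, Bool.true_and, ih]
      · cases buf with
        | some b =>
          simp only [pvScan, pvFindMarker, hm, Bool.false_eq_true, if_false,
            Option.isNone_some, Bool.false_and, ih]
        | none =>
          simp only [pvScan, pvFindMarker, pvFindFallback, hm, hf, Bool.false_eq_true,
            if_false, Option.isNone_none, Bool.true_and, ih]

-- ===== VERDICT (by name: the statement is the Claim_ definition above) =====
theorem extract_violation_py_spec : Claim_equal_extract_violation_py := by
  intro text _
  unfold Spec_extract_violation_py extract_violation_py extract_violation_py_alt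
  rw [pvScan_eq]
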